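-- pv_equiv track=rewrite | github.com/Tichow/eeg-project | viz/static_psd_window.py | _segment_display_names
-- ===== SOURCE A (Python) =====
-- def _segment_display_names(segments: list[tuple[str, ...]]) -> list[str]:
--     """Retourne une liste de noms affichables pour chaque segment."""
--     counts: dict[str, int] = {}
--     for label, *_ in segments:
--         counts[label] = counts.get(label, 0) + 1
--     idx: dict[str, int] = {}
--     names = []
--     for label, *_ in segments:
--         i = idx.get(label, 0)
--         idx[label] = i + 1
--         names.append(f'{label} {i + 1}/{counts[label]}' if counts[label] > 1 else label)
--     return names
-- ===== SOURCE B (Python) =====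
-- def _segment_display_names(segments: list[tuple[str, ...]]) -> list[str]:
--     """Retourne une liste de noms affichables pour chaque segment."""
--     heads = [seg[0] for seg in segments]
--     return [
--         f'{label} {heads[:p].count(label) + 1}/{heads.count(label)}'
--         if heads.count(label) > 1 else label
--         for p, label in enumerate(heads)
--     ]
-- ===== Notes on version B (the rewrite author's own statement) =====
-- stated objective: alternative
-- what changed: Replaces A's two dict-building passes (counts dict, then running-index dict) with a dict-free positional formulation: for each position the occurrence index is the count of the label in the prefix heads[:p] and the total is heads.count(label).
import Mathlib
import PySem

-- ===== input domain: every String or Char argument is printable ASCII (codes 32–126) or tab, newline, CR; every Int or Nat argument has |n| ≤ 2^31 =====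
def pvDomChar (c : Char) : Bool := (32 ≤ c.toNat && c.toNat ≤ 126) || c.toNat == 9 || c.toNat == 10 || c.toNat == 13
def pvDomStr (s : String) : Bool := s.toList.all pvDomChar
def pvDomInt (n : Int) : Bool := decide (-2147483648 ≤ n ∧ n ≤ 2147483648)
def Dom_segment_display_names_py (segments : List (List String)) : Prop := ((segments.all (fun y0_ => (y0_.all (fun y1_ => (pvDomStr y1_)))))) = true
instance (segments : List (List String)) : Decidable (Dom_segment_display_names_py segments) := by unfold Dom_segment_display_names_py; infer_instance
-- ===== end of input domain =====

-- B replaces A's two dict passes (label counts, then running occurrence indices) by a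
-- dict-free positional formulation: before = count in heads[:p], total = heads.count(label).
-- Objective: alternative (same return value; no speed claim).


-- ===== PORT A =====
-- Literal port of A: first loop builds counts[label]; second loop keeps a running
-- index dict and appends the display name. 'label, *_' is seg.headD "" (Pre_ excludes
-- empty segments, where Python raises ValueError); counts[label] is read with getD 0,
-- which never defaults since label occurs in segments.
def segment_display_names_py (segments : List (List String)) : List String :=
  let counts : PySem.Dict String Int :=
    segments.foldl (fun d seg =>
      let label := seg.headD ""
      d.insert label (d.getD label 0 + 1)) PySem.Dict.empty
  (segments.foldl (fun (st : PySem.Dict String Int × List String) seg =>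
      let label := seg.headD ""
      let i := st.1.getD label 0
      let c := counts.getD label 0
      (st.1.insert label (i + 1),
       st.2 ++ [if c > 1 then
                  label ++ " " ++ PySem.Int.toStr (i + 1) ++ "/" ++ PySem.Int.toStr c
                else label])) (PySem.Dict.empty, ([] : List String))).2

-- ===== PORT B =====
-- Literal port of B: heads = [seg[0] for seg in segments] (seg[0] = headD "" under Pre_),
-- then one comprehension over enumerate(heads) using heads[:p].count and heads.count.
def segment_display_names_py_alt (segments : List (List String)) : List String :=
  let heads := segments.map (fun seg => seg.headD "")
  (PySem.List.enumerate heads).map (fun pl =>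
    let label := pl.2
    let before : Int := PySem.List.count (PySem.List.slice heads none (some pl.1)) label
    let total : Int := PySem.List.count heads label
    if total > 1 then
      label ++ " " ++ PySem.Int.toStr (before + 1) ++ "/" ++ PySem.Int.toStr total
    else label)

-- ===== PRECONDITION & SPEC =====
-- Pre_ excludes segments containing an empty tuple, on which A's 'label, *_' unpacking
-- raises ValueError (and B's seg[0] raises IndexError).
def Pre_segment_display_names_py (segments : List (List String)) : Prop :=
  ∀ seg ∈ segments, seg ≠ []
instance (segments : List (List String)) : Decidable (Pre_segment_display_names_py segments) := by unfold Pre_segment_display_names_py; infer_instance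
def pvWitness_segment_display_names_py : List (List String) := [["a"], ["b", "x"], ["a"]]

def Spec_segment_display_names_py (segments : List (List String)) (out : List String) : Prop := out = segment_display_names_py_alt segments
instance (segments : List (List String)) (out : List String) : Decidable (Spec_segment_display_names_py segments out) := by unfold Spec_segment_display_names_py; infer_instance

-- ===== CLAIM (what is proved, stated in full; the proofs are below) =====
def Claim_equal_segment_display_names_py : Prop := ∀ (segments : List (List String)), Dom_segment_display_names_py segments → Pre_segment_display_names_py segments → Spec_segment_display_names_py segments (segment_display_names_py segments)

-- ===== LEMMAS AND PROOFS =====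

-- the rendered name, parametrised by occurrence index k (= i+1) and total
def pvRender (label : String) (k total : Int) : String :=
  if total > 1 then label ++ " " ++ PySem.Int.toStr k ++ "/" ++ PySem.Int.toStr total
  else label

-- common reference: names of `rest` given the already-seen prefix `done`, totals via C
def pvG (C : String → Int) : List String → List String → List String
  | _, [] => []
  | done, l :: rest =>
      pvRender l ((done.count l : Int) + 1) (C l) :: pvG C (done ++ [l]) rest

lemma pvG_A {α : Type} (f : α → String) (C : String → Int) (rest : List α)
    (done acc : List String) :
    (rest.foldl (fun (st : PySem.Dict String Int × List String) seg =>
        (st.1.insert (f seg) (st.1.getD (f seg) 0 + 1),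
         st.2 ++ [if C (f seg) > 1 then
                    f seg ++ " " ++ PySem.Int.toStr (st.1.getD (f seg) 0 + 1) ++ "/" ++ PySem.Int.toStr (C (f seg))
                  else f seg]))
      (done.foldl (fun d x => d.insert x (d.getD x 0 + 1)) PySem.Dict.empty, acc)).2
    = acc ++ pvG C done (rest.map f) := by
  induction rest generalizing done acc with
  | nil => simp [pvG]
  | cons seg rest ih =>
    have hd : (done.foldl (fun d x => d.insert x (d.getD x 0 + 1)) PySem.Dict.empty).getD (f seg) 0
        = (done.count (f seg) : Int) := by
      rw [PySem.Dict.getD_foldl_insert_add_one, PySem.Dict.getD_empty]; ring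
    have hstep : (done.foldl (fun d x => d.insert x (d.getD x 0 + 1)) PySem.Dict.empty).insert (f seg)
          ((done.count (f seg) : Int) + 1)
        = (done ++ [f seg]).foldl (fun d x => d.insert x (d.getD x 0 + 1)) PySem.Dict.empty := by
      rw [List.foldl_append, List.foldl_cons, List.foldl_nil, hd]
    simp only [List.foldl_cons, hd, hstep, ih, List.map_cons, pvG, pvRender]
    simp

lemma pvG_B (C : String → Int) (rest done : List String) :
    (PySem.List.enumerate rest (done.length : Int)).map (fun pl =>
        let label := pl.2
        let before : Int := PySem.List.count (PySem.List.slice (done ++ rest) none (some pl.1)) label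
        if C label > 1 then
          label ++ " " ++ PySem.Int.toStr (before + 1) ++ "/" ++ PySem.Int.toStr (C label)
        else label)
    = pvG C done rest := by
  induction rest generalizing done with
  | nil => simp [pvG, PySem.List.enumerate]
  | cons l rest ih =>
    rw [PySem.List.enumerate_cons, List.map_cons,
        show done ++ l :: rest = (done ++ [l]) ++ rest from by simp,
        show (done.length : Int) + 1 = ((done ++ [l]).length : Int) from by simp]
    simp only [pvG]
    congr 1
    · simp [PySem.List.slice_to _ (Int.natCast_nonneg done.length), List.append_assoc,
            pvRender, PySem.List.count_eq]
    · exact ih (done ++ [l])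

-- ===== VERDICT (by name: the statement is the Claim_ definition above) =====
theorem segment_display_names_py_spec : Claim_equal_segment_display_names_py := by
  intro segments _ _
  show segment_display_names_py segments = segment_display_names_py_alt segments
  unfold segment_display_names_py segment_display_names_py_alt
  set heads := segments.map (fun seg => seg.headD "") with hheads
  have hfold : (segments.foldl (fun d seg =>
        let label := seg.headD ""
        d.insert label (d.getD label 0 + 1)) (PySem.Dict.empty : PySem.Dict String Int))
      = ((segments.map (fun seg => seg.headD "")).foldl
          (fun d x => d.insert x (d.getD x 0 + 1)) (PySem.Dict.empty : PySem.Dict String Int)) := by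
    rw [List.foldl_map]
  have hC : ∀ l, (segments.foldl (fun d seg =>
        let label := seg.headD ""
        d.insert label (d.getD label 0 + 1)) PySem.Dict.empty).getD l 0
      = (heads.count l : Int) := by
    intro l
    rw [hfold, PySem.Dict.getD_foldl_insert_add_one, PySem.Dict.getD_empty, hheads]; ring
  have hA : (segments.foldl (fun (st : PySem.Dict String Int × List String) seg =>
      let label := seg.headD ""
      let i := st.1.getD label 0
      let c := (heads.count label : Int)
      (st.1.insert label (i + 1),
       st.2 ++ [if c > 1 then
                  label ++ " " ++ PySem.Int.toStr (i + 1) ++ "/" ++ PySem.Int.toStr c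
                else label])) (PySem.Dict.empty, ([] : List String))).2
      = pvG (fun l => (heads.count l : Int)) [] heads := by
    rw [hheads]
    exact pvG_A (fun seg => seg.headD "") (fun l => ((segments.map (fun seg => seg.headD "")).count l : Int)) segments [] []
  calc (segments.foldl (fun (st : PySem.Dict String Int × List String) seg =>
      let label := seg.headD ""
      let i := st.1.getD label 0
      let c := (segments.foldl (fun d seg =>
          let label := seg.headD ""
          d.insert label (d.getD label 0 + 1)) PySem.Dict.empty).getD label 0
      (st.1.insert label (i + 1),
       st.2 ++ [if c > 1 then
                  label ++ " " ++ PySem.Int.toStr (i + 1) ++ "/" ++ PySem.Int.toStr c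
                else label])) (PySem.Dict.empty, ([] : List String))).2
      = pvG (fun l => (heads.count l : Int)) [] heads := by
        simp only [hC]; exact hA
    _ = (PySem.List.enumerate heads (([] : List String).length : Int)).map (fun pl =>
        let label := pl.2
        let before : Int := PySem.List.count (PySem.List.slice (([] : List String) ++ heads) none (some pl.1)) label
        if (heads.count label : Int) > 1 then
          label ++ " " ++ PySem.Int.toStr (before + 1) ++ "/" ++ PySem.Int.toStr (heads.count label : Int)
        else label) := (pvG_B _ heads []).symm
    _ = _ := by simp [PySem.List.count_eq]
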